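-- pv_equiv track=rewrite | github.com/iszekeres/na-powertrain-pipeline | tools/comfort_weakspot_scanner.py | assign_tps_bin
-- ===== SOURCE A (Python) =====
-- TPS_AXIS = [0, 6, 12, 19, 25, 31, 37, 44, 50, 56, 62, 69, 75, 81, 87, 94, 100]
--
-- def assign_tps_bin(value):
--     try:
--         pct = float(value)
--     except (ValueError, TypeError):
--         return None
--     pct = max(0.0, pct)
--     for b in TPS_AXIS:
--         if pct <= b:
--             return int(b)
--     return 100
-- ===== SOURCE B (Python) =====
-- TPS_AXIS = [0, 6, 12, 19, 25, 31, 37, 44, 50, 56, 62, 69, 75, 81, 87, 94, 100]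
--
-- def assign_tps_bin(value):
--     try:
--         pct = float(value)
--     except (ValueError, TypeError):
--         return None
--     pct = max(0.0, pct)
--     # binary search: first index with TPS_AXIS[i] >= pct (bisect_left)
--     lo, hi = 0, len(TPS_AXIS)
--     while lo < hi:
--         mid = (lo + hi) // 2
--         if TPS_AXIS[mid] < pct:
--             lo = mid + 1
--         else:
--             hi = mid
--     return int(TPS_AXIS[lo]) if lo < len(TPS_AXIS) else 100
-- ===== Notes on version B (the rewrite author's own statement) =====
-- stated objective: alternative
-- what changed: Replaces A's linear scan of the TPS axis for the first bin >= pct with a hand-written bisect_left binary search over the sorted axis, then indexes the found position.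
import Mathlib
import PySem

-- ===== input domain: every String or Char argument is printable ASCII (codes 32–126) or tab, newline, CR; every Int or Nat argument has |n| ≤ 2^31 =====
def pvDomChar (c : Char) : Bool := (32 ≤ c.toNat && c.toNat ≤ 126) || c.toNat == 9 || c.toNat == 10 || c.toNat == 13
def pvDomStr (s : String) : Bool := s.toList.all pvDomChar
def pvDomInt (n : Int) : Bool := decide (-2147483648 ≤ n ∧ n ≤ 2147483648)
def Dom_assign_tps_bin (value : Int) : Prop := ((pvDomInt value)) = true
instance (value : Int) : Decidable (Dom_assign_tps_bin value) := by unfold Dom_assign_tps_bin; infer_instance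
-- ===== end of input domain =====

-- B replaces A's linear scan of the sorted TPS axis with a bisect_left binary search (alternative algorithm, same result).
-- float(value) never raises on an int, so the None branch is unreachable; both ports are total.

-- ===== PORT A =====
def TPS_AXIS : List Int := [0, 6, 12, 19, 25, 31, 37, 44, 50, 56, 62, 69, 75, 81, 87, 94, 100]

-- the 'for b in TPS_AXIS: if pct <= b: return int(b)' loop, then the fallthrough 'return 100'
def tpsScan (pct : Int) : List Int -> Option Int
  | [] => some 100
  | b :: rest => if pct <= b then some b else tpsScan pct rest

def assign_tps_bin (value : Int) : Option Int :=
  let pct := max (0 : Int) value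
  tpsScan pct TPS_AXIS

-- ===== PORT B =====
-- the hand-written bisect_left while loop of Source B (xs[mid] via getD: indices stay in range)
-- fuel makes the while loop structural; fuel = hi - lo suffices since the gap shrinks every iteration
def bsearchLoop (xs : List Int) (pct : Int) : Nat → Nat → Nat → Nat
  | 0, lo, _ => lo
  | fuel + 1, lo, hi =>
    if lo < hi then
      let mid := (lo + hi) / 2
      if xs.getD mid 0 < pct then bsearchLoop xs pct fuel (mid + 1) hi
      else bsearchLoop xs pct fuel lo mid
    else lo

def assign_tps_bin_alt (value : Int) : Option Int :=
  let pct := max (0 : Int) value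
  let lo := bsearchLoop TPS_AXIS pct TPS_AXIS.length 0 TPS_AXIS.length
  if lo < TPS_AXIS.length then some (TPS_AXIS.getD lo 0) else some 100

-- ===== PRECONDITION & SPEC =====
def Spec_assign_tps_bin (value : Int) (out : Option Int) : Prop := out = assign_tps_bin_alt value
instance (value : Int) (out : Option Int) : Decidable (Spec_assign_tps_bin value out) := by unfold Spec_assign_tps_bin; infer_instance

-- ===== CLAIM (what is proved, stated in full; the proofs are below) =====
def Claim_equal_assign_tps_bin : Prop := ∀ (value : Int), Dom_assign_tps_bin value → Spec_assign_tps_bin value (assign_tps_bin value)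

-- ===== LEMMAS AND PROOFS =====

-- agreement for every clamped value in [0,100]: 101 closed cases
lemma agree_le (p : Int) (h0 : 0 <= p) (h1 : p <= 100) :
    tpsScan p TPS_AXIS =
      (let lo := bsearchLoop TPS_AXIS p TPS_AXIS.length 0 TPS_AXIS.length
       if lo < TPS_AXIS.length then some (TPS_AXIS.getD lo 0) else some 100) := by
  interval_cases p <;> decide

-- when pct exceeds every element, the scan never fires and falls through to 100
lemma scan_all_lt (p : Int) : ∀ xs : List Int, (∀ b ∈ xs, b < p) → tpsScan p xs = some 100 := by
  intro xs
  induction xs with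
  | nil => intro _; rfl
  | cons b rest ih =>
    intro hall
    simp only [tpsScan]
    rw [if_neg (not_le.2 (hall b (List.mem_cons_self)))]
    exact ih (fun x hx => hall x (List.mem_cons_of_mem _ hx))

-- when pct exceeds every element, the search always takes the lower branch and ends at hi
lemma bsearch_all_lt (xs : List Int) (p : Int) (hall : ∀ i : Nat, xs.getD i 0 < p) :
    ∀ (fuel lo hi : Nat), lo ≤ hi → hi - lo ≤ fuel →
      bsearchLoop xs p fuel lo hi = hi := by
  intro fuel
  induction fuel with
  | zero => intro lo hi hle hf; simp only [bsearchLoop]; omega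
  | succ n ih =>
    intro lo hi hle hf
    simp only [bsearchLoop]
    by_cases hlt : lo < hi
    · rw [if_pos hlt, if_pos (hall _)]
      exact ih _ _ (by omega) (by omega)
    · rw [if_neg hlt]; omega

-- above the axis: the scan falls through to 100 and the search returns length
lemma agree_gt (p : Int) (h : 100 < p) :
    tpsScan p TPS_AXIS =
      (let lo := bsearchLoop TPS_AXIS p TPS_AXIS.length 0 TPS_AXIS.length
       if lo < TPS_AXIS.length then some (TPS_AXIS.getD lo 0) else some 100) := by
  have hs : tpsScan p TPS_AXIS = some 100 := by
    exact scan_all_lt p TPS_AXIS (by intro b hb; fin_cases hb <;> omega)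
  have hb : bsearchLoop TPS_AXIS p TPS_AXIS.length 0 TPS_AXIS.length = 17 := by
    exact bsearch_all_lt TPS_AXIS p
      (by
        intro i
        have : TPS_AXIS.getD i 0 ≤ 100 := by
          match i with
          | 0 => decide | 1 => decide | 2 => decide | 3 => decide | 4 => decide
          | 5 => decide | 6 => decide | 7 => decide | 8 => decide | 9 => decide
          | 10 => decide | 11 => decide | 12 => decide | 13 => decide | 14 => decide
          | 15 => decide | 16 => decide | (n+17) => simp [TPS_AXIS, List.getD]
        omega)
      17 0 17 (by omega) (by omega)
  rw [hs]
  simp only [hb]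
  decide

theorem assign_tps_bin_spec : Claim_equal_assign_tps_bin := by
  intro value _
  unfold Spec_assign_tps_bin assign_tps_bin assign_tps_bin_alt
  set p := max (0 : Int) value with hp
  have h0 : 0 <= p := le_max_left _ _
  by_cases h : p <= 100
  · exact agree_le p h0 h
  · exact agree_gt p (by omega)
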